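-- pv_equiv track=rewrite | github.com/SAARTHII-AI/Saarthi-AI | backend/app/services/speech_service.py | _escape_ssml
-- ===== SOURCE A (Python) =====
-- def _escape_ssml(text: str) -> str:
--     """Escape special characters for SSML."""
--     replacements = {
--         "&": "&amp;",
--         "<": "&lt;",
--         ">": "&gt;",
--         '"': "&quot;",
--         "'": "&apos;",
--     }
--     for char, escaped in replacements.items():
--         text = text.replace(char, escaped)
--     return text
-- ===== SOURCE B (Python) =====
-- def _escape_ssml(text: str) -> str:
--     """Escape special characters for SSML in one pass over the characters."""
--     replacements = {
--         "&": "&amp;",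
--         "<": "&lt;",
--         ">": "&gt;",
--         '"': "&quot;",
--         "'": "&apos;",
--     }
--     return "".join(replacements.get(ch, ch) for ch in text)
-- ===== Notes on version B (the rewrite author's own statement) =====
-- stated objective: idiomatic
-- what changed: Replaced five sequential full-string str.replace scans by a single pass over the characters that appends replacements.get(ch, ch) and joins once.
import Mathlib
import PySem

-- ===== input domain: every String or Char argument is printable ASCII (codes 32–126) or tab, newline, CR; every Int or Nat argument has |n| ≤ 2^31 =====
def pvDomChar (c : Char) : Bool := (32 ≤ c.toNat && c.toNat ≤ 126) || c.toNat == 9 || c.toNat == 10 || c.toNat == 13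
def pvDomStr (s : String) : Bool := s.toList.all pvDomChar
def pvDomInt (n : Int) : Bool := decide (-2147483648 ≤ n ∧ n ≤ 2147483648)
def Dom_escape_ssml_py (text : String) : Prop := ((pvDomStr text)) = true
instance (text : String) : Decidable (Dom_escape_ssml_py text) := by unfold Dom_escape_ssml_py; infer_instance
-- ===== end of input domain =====

-- B escapes SSML special characters in one pass over the characters with a table lookup,
-- instead of A's five sequential full-string replace passes (idiomatic; same result).


-- ===== PORT A =====
-- replacements.items() iterated in insertion order; each iteration is text = text.replace(char, escaped)
def escape_ssml_py (text : String) : String :=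
  [("&", "&amp;"), ("<", "&lt;"), (">", "&gt;"), ("\"", "&quot;"), ("'", "&apos;")].foldl
    (fun t (p : String × String) => PySem.Str.replace t p.1 p.2) text

-- ===== PORT B =====
-- the replacements dict (single-char string keys ported as Char)
def pvRepl : PySem.Dict Char String :=
  PySem.Dict.ofList [('&', "&amp;"), ('<', "&lt;"), ('>', "&gt;"), ('"', "&quot;"), ('\'', "&apos;")]

-- "".join(replacements.get(ch, ch) for ch in text)
def escape_ssml_py_alt (text : String) : String :=
  PySem.Str.join "" (text.toList.map (fun ch => (pvRepl.get? ch).getD (String.singleton ch)))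

-- ===== PRECONDITION & SPEC =====
def Spec_escape_ssml_py (text : String) (out : String) : Prop := out = escape_ssml_py_alt text
instance (text : String) (out : String) : Decidable (Spec_escape_ssml_py text out) := by unfold Spec_escape_ssml_py; infer_instance

-- ===== CLAIM (what is proved, stated in full; the proofs are below) =====
def Claim_equal_escape_ssml_py : Prop := ∀ (text : String), Dom_escape_ssml_py text → Spec_escape_ssml_py text (escape_ssml_py text)

-- ===== LEMMAS AND PROOFS =====

-- replacing one single-character pattern is a flatMap substitution
def pvSub (c : Char) (new : List Char) (s : List Char) : List Char :=
  s.flatMap (fun x => if x = c then new else [x])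

lemma pvSub_cons (c : Char) (new : List Char) (x : Char) (t : List Char) :
    pvSub c new (x :: t) = (if x = c then new else [x]) ++ pvSub c new t := by
  simp [pvSub]

lemma go_single (c : Char) (new : List Char) :
    ∀ (l : List Char) (fuel : Nat) (acc : List Char), l.length ≤ fuel →
      PySem.Chars.replace.go [c] new fuel l acc = acc.reverse ++ pvSub c new l := by
  intro l
  induction l with
  | nil =>
    intro fuel acc _
    cases fuel <;> simp [PySem.Chars.replace.go, pvSub]
  | cons x t ih =>
    intro fuel acc h
    cases fuel with
    | zero => simp at h
    | succ n =>
      have ht : t.length ≤ n := by simpa using h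
      simp only [PySem.Chars.replace.go]
      by_cases hx : x = c
      · subst hx
        have hp : List.isPrefixOf [x] (x :: t) = true := by
          simp [List.isPrefixOf]
        rw [if_pos hp]
        simp only [List.length_cons, List.drop_succ_cons, List.length_nil, List.drop_zero]
        rw [ih n (new.reverse ++ acc) ht, pvSub_cons]
        simp
      · have hp : List.isPrefixOf [c] (x :: t) = false := by
          simp [List.isPrefixOf]
          exact fun hcx => absurd hcx.symm hx
        rw [if_neg (by simp [hp])]
        rw [ih n (x :: acc) ht, pvSub_cons, if_neg hx]
        simp

lemma replace_single (s : List Char) (c : Char) (new : List Char) :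
    PySem.Chars.replace s [c] new = pvSub c new s := by
  unfold PySem.Chars.replace
  simp only [List.isEmpty_cons, if_false, Bool.false_eq_true]
  exact go_single c new s s.length [] le_rfl

lemma pvSub_append (c : Char) (new a b : List Char) :
    pvSub c new (a ++ b) = pvSub c new a ++ pvSub c new b := by
  simp [pvSub]

-- the simultaneous per-character substitution both programs compute
def pvF (c : Char) : List Char :=
  if c = '&' then "&amp;".toList else if c = '<' then "&lt;".toList
  else if c = '>' then "&gt;".toList else if c = '"' then "&quot;".toList
  else if c = '\'' then "&apos;".toList else [c]

lemma chain_eq (s : List Char) :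
    pvSub '\'' "&apos;".toList (pvSub '"' "&quot;".toList (pvSub '>' "&gt;".toList
      (pvSub '<' "&lt;".toList (pvSub '&' "&amp;".toList s)))) = s.flatMap pvF := by
  induction s with
  | nil => rfl
  | cons x t ih =>
    rw [pvSub_cons, pvSub_append, pvSub_append, pvSub_append, pvSub_append,
        List.flatMap_cons, ← ih]
    congr 1
    by_cases h1 : x = '&'; · subst h1; decide
    by_cases h2 : x = '<'; · subst h2; decide
    by_cases h3 : x = '>'; · subst h3; decide
    by_cases h4 : x = '"'; · subst h4; decide
    by_cases h5 : x = '\''; · subst h5; decide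
    simp [pvSub, pvF, h1, h2, h3, h4, h5]

lemma join_nil_flatten (l : List (List Char)) : PySem.Chars.join [] l = l.flatten := by
  induction l with
  | nil => simp [PySem.Chars.join_nil]
  | cons a r ih =>
    cases r with
    | nil => simp [PySem.Chars.join_singleton]
    | cons b r' => rw [PySem.Chars.join_cons_cons, ih]; simp

lemma getD_eq_pvF (c : Char) :
    ((pvRepl.get? c).getD (String.singleton c)).toList = pvF c := by
  by_cases h1 : c = '&'; · subst h1; decide
  by_cases h2 : c = '<'; · subst h2; decide
  by_cases h3 : c = '>'; · subst h3; decide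
  by_cases h4 : c = '"'; · subst h4; decide
  by_cases h5 : c = '\''; · subst h5; decide
  have hnone : pvRepl.get? c = none := by
    simp [pvRepl, PySem.Dict.ofList, PySem.Dict.get?, PySem.Dict.update,
          PySem.Dict.insert, PySem.Dict.empty]
    exact ⟨fun h => h1 h.symm, fun h => h2 h.symm, fun h => h3 h.symm,
           fun h => h4 h.symm, fun h => h5 h.symm⟩
  simp [hnone, pvF, h1, h2, h3, h4, h5]

lemma alt_toList (text : String) :
    (escape_ssml_py_alt text).toList = text.toList.flatMap pvF := by
  unfold escape_ssml_py_alt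
  rw [PySem.Str.toList_join, show ("" : String).toList = [] from rfl, join_nil_flatten]
  simp only [List.map_map]
  rw [List.flatten_eq_flatMap, List.flatMap_map]
  exact List.flatMap_congr (fun c _ => getD_eq_pvF c)

lemma a_toList (text : String) :
    (escape_ssml_py text).toList = text.toList.flatMap pvF := by
  unfold escape_ssml_py
  simp only [List.foldl_cons, List.foldl_nil, PySem.Str.replace, String.toList_ofList]
  rw [← chain_eq]
  simp only [show ("&" : String).toList = ['&'] from rfl,
             show ("<" : String).toList = ['<'] from rfl,
             show (">" : String).toList = ['>'] from rfl,
             show ("\"" : String).toList = ['"'] from rfl,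
             show ("'" : String).toList = ['\''] from rfl,
             replace_single]

-- ===== VERDICT (by name: the statement is the Claim_ definition above) =====
theorem escape_ssml_py_spec : Claim_equal_escape_ssml_py := by
  intro text _
  unfold Spec_escape_ssml_py
  have h : (escape_ssml_py text).toList = (escape_ssml_py_alt text).toList := by
    rw [a_toList, alt_toList]
  calc escape_ssml_py text = String.ofList (escape_ssml_py text).toList := by
        rw [String.ofList_toList]
    _ = String.ofList (escape_ssml_py_alt text).toList := by rw [h]
    _ = escape_ssml_py_alt text := by rw [String.ofList_toList]
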